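-- pv_equiv track=rewrite | github.com/jongtix/Python_Baekjoon | TEST/테크멜론/TEST2.py | solution
-- ===== SOURCE A (Python) =====
-- def solution(arr):
--     minimum = arr[0]
--     maximum = -1
--     for idx in range(1, len(arr)):
--         stand = arr[idx]
--         comp = arr[idx - 1]
--         if minimum > comp: minimum = comp
--         if stand > minimum and stand - minimum > maximum: maximum = stand - minimum
--     return maximum
-- ===== SOURCE B (Python) =====
-- def solution(arr):
--     # suffix running-maximum table built right-to-left, then one forward pass
--     suffix = []
--     cur = None
--     for x in reversed(arr):
--         cur = x if cur is None else max(cur, x)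
--         suffix.append(cur)
--     suffix.reverse()
--     best = -1
--     for x, s in zip(arr, suffix[1:]):
--         d = s - x
--         if d > 0 and d > best:
--             best = d
--     return best
-- ===== Notes on version B (the rewrite author's own statement) =====
-- stated objective: alternative
-- what changed: A's single forward pass with a running prefix-minimum is replaced by building a suffix-maximum table in a right-to-left scan and then taking the best strictly-positive difference suffix_max[i+1]-arr[i] in a separate forward pass over zip(arr, suffix[1:]).
-- outside the precondition, e.g. on solution([]): A raises IndexError, B returns -1
import Mathlib
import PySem

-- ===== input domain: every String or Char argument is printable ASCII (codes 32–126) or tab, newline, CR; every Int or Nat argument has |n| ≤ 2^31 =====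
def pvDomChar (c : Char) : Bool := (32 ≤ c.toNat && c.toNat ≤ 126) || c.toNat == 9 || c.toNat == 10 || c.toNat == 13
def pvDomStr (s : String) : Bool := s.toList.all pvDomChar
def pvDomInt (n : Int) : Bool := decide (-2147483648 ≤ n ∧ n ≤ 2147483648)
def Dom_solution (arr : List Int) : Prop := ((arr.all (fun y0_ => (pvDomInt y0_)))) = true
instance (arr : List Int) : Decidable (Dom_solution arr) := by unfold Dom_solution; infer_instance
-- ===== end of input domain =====

-- B replaces A's forward running-minimum pass by a right-to-left suffix-maximum table plus a
-- separate forward pass over (element, suffix-max) pairs: an alternative decomposition, same O(n) cost.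


-- ===== PORT A =====
-- minimum = first element; for idx in range(1, len(arr)): running-minimum update, then best-diff update.
def solution (arr : List Int) : Int :=
  ((PySem.List.pyRange 1 (arr.length : Int) 1).foldl
    (fun (st : Int × Int) idx =>
      let stand := PySem.List.pyGetD arr idx 0
      let comp := PySem.List.pyGetD arr (idx - 1) 0
      let minimum := if st.1 > comp then comp else st.1
      let maximum := if stand > minimum ∧ stand - minimum > st.2 then stand - minimum else st.2
      (minimum, maximum))
    (PySem.List.pyGetD arr 0 0, -1)).2

-- ===== PORT B =====
-- suffix running-maximum table built over reversed(arr), then one forward pass over zip(arr, suffix[1:]).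
def solution_alt (arr : List Int) : Int :=
  let p := arr.reverse.foldl
    (fun (st : Option Int × List Int) x =>
      let cur := match st.1 with | none => x | some c => max c x
      (some cur, st.2 ++ [cur]))
    (none, [])
  let suffix := p.2.reverse
  (arr.zip (PySem.List.slice suffix (some 1) none)).foldl
    (fun best q =>
      let d := q.2 - q.1
      if d > 0 ∧ d > best then d else best)
    (-1)

-- ===== PRECONDITION & SPEC =====
-- Pre_ excludes only the empty list, on which A raises IndexError at its first-element access.
def Pre_solution (arr : List Int) : Prop := arr ≠ []
instance (arr : List Int) : Decidable (Pre_solution arr) := by unfold Pre_solution; infer_instance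
def pvWitness_solution : List Int := [1, 3, 2]

def Spec_solution (arr : List Int) (out : Int) : Prop := out = solution_alt arr
instance (arr : List Int) (out : Int) : Decidable (Spec_solution arr out) := by unfold Spec_solution; infer_instance

-- ===== CLAIM (what is proved, stated in full; the proofs are below) =====
def Claim_equal_solution : Prop := ∀ (arr : List Int), Dom_solution arr → Pre_solution arr → Spec_solution arr (solution arr)

-- ===== LEMMAS AND PROOFS =====

-- `pos d` clamps a non-positive difference to the sentinel -1.
def pvPos (d : Int) : Int := if 0 < d then d else -1

-- all differences arr[j] - arr[i] over pairs i < j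
def pvAllDiffs : List Int → List Int
  | [] => []
  | x :: xs => xs.map (fun y => y - x) ++ pvAllDiffs xs

-- suffix maxima: pvSfx arr [i] = max arr[i..]
def pvSfx : List Int → List Int
  | [] => []
  | x :: xs => (xs.foldl max x) :: pvSfx xs

-- A's running-minimum difference stream
def pvAD (m : Int) : List Int → List Int
  | [] => []
  | c :: rest => (c - m) :: pvAD (min m c) rest

-- cumulative maxima with seed c (B's reverse scan stream)
def pvCM (c : Int) : List Int → List Int
  | [] => []
  | y :: t => (max c y) :: pvCM (max c y) t

def pvCM0 : List Int → List Int
  | [] => []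
  | y :: t => y :: pvCM y t

-- A's loop body as a function of (state, previous element, current element)
def pvAStep (st : Int × Int) (comp stand : Int) : Int × Int :=
  let minimum := if st.1 > comp then comp else st.1
  (minimum, if stand > minimum ∧ stand - minimum > st.2 then stand - minimum else st.2)

lemma pvPos_max (u v : Int) : pvPos (max u v) = max (pvPos u) (pvPos v) := by
  unfold pvPos; split_ifs <;> omega

lemma clip_eq (M d : Int) (h : -1 ≤ M) :
    (if 0 < d ∧ d > M then d else M) = max M (pvPos d) := by
  unfold pvPos; split_ifs <;> omega

lemma foldl_max_pull (l : List Int) : ∀ (a b : Int), l.foldl max (max a b) = max a (l.foldl max b) := by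
  induction l with
  | nil => intro a b; simp
  | cons c l ih =>
    intro a b
    simpa [List.foldl_cons, max_assoc] using ih a (max b c)

lemma foldl_max_reverse (l : List Int) : ∀ (a : Int), l.reverse.foldl max a = l.foldl max a := by
  induction l with
  | nil => intro a; simp
  | cons x l ih =>
    intro a
    have h1 : (x :: l).reverse.foldl max a = max (l.foldl max a) x := by
      simp [List.foldl_append, ih]
    have h2 : (x :: l).foldl max a = max x (l.foldl max a) := by
      simp only [List.foldl_cons]
      rw [max_comm a x, foldl_max_pull]
    rw [h1, h2, max_comm]

-- folding max over pos-clamped shifted values of a nonempty list is one clamped max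
lemma foldl_max_pos_shift (t : List Int) : ∀ (q a M : Int),
    ((q :: t).map (fun y => pvPos (y - a))).foldl max M = max M (pvPos (t.foldl max q - a)) := by
  induction t with
  | nil => intro q a M; simp
  | cons c t ih =>
    intro q a M
    have h2 : t.foldl max (max q c) = max q (t.foldl max c) := foldl_max_pull t q c
    calc ((q :: c :: t).map (fun y => pvPos (y - a))).foldl max M
        = ((c :: t).map (fun y => pvPos (y - a))).foldl max (max M (pvPos (q - a))) := by
          simp [List.foldl_cons]
      _ = max (max M (pvPos (q - a))) (pvPos (t.foldl max c - a)) := ih c a _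
      _ = max M (pvPos ((c :: t).foldl max q - a)) := by
          simp only [List.foldl_cons]
          rw [h2]
          have : max q (t.foldl max c) - a = max (q - a) (t.foldl max c - a) := by omega
          rw [this, pvPos_max, max_assoc]

-- a fold of pointwise maxima splits into two folds
lemma foldl_max_map_max (f g : Int → Int) (l : List Int) : ∀ (M : Int),
    (l.map (fun y => max (f y) (g y))).foldl max M
      = (l.map g).foldl max ((l.map f).foldl max M) := by
  induction l with
  | nil => intro M; simp
  | cons y l ih =>
    intro M
    have h : max M (max (f y) (g y)) = max (g y) (max M (f y)) := by omega
    calc ((y :: l).map (fun y => max (f y) (g y))).foldl max M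
        = (l.map (fun y => max (f y) (g y))).foldl max (max M (max (f y) (g y))) := by
          simp [List.foldl_cons]
      _ = (l.map g).foldl max ((l.map f).foldl max (max M (max (f y) (g y)))) := ih _
      _ = (l.map g).foldl max ((l.map f).foldl max (max (g y) (max M (f y)))) := by rw [h]
      _ = (l.map g).foldl max (max (g y) ((l.map f).foldl max (max M (f y)))) := by
          rw [foldl_max_pull]
      _ = ((y :: l).map g).foldl max (((y :: l).map f).foldl max M) := by
          simp [List.foldl_cons, max_comm]

-- A's running-minimum stream folds to the all-pairs fold
lemma pvAD_eq_allDiffs (ys : List Int) : ∀ (m M : Int),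
    ((pvAD m ys).map pvPos).foldl max M
      = ((pvAllDiffs ys).map pvPos).foldl max ((ys.map (fun y => pvPos (y - m))).foldl max M) := by
  induction ys with
  | nil => intro m M; simp [pvAD, pvAllDiffs]
  | cons c rest ih =>
    intro m M
    have key : (rest.map (fun y => pvPos (y - min m c))).foldl max (max M (pvPos (c - m)))
        = (rest.map (fun y => pvPos (y - c))).foldl max
            ((rest.map (fun y => pvPos (y - m))).foldl max (max M (pvPos (c - m)))) := by
      have hpt : (fun y => pvPos (y - min m c)) = fun y => max (pvPos (y - m)) (pvPos (y - c)) := by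
        funext y
        have h : y - min m c = max (y - m) (y - c) := by omega
        rw [h, pvPos_max]
      rw [hpt]
      exact foldl_max_map_max (fun y => pvPos (y - m)) (fun y => pvPos (y - c)) rest _
    calc ((pvAD m (c :: rest)).map pvPos).foldl max M
        = ((pvAD (min m c) rest).map pvPos).foldl max (max M (pvPos (c - m))) := by
          simp [pvAD, List.foldl_cons]
      _ = ((pvAllDiffs rest).map pvPos).foldl max
            ((rest.map (fun y => pvPos (y - min m c))).foldl max (max M (pvPos (c - m)))) := ih _ _
      _ = ((pvAllDiffs rest).map pvPos).foldl max
            ((rest.map (fun y => pvPos (y - c))).foldl max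
              ((rest.map (fun y => pvPos (y - m))).foldl max (max M (pvPos (c - m))))) := by rw [key]
      _ = ((pvAllDiffs (c :: rest)).map pvPos).foldl max
            (((c :: rest).map (fun y => pvPos (y - m))).foldl max M) := by
          simp [pvAllDiffs, List.map_append, List.foldl_append, List.foldl_cons,
                Function.comp_def]

-- consecutive pairs of a snoc list
lemma zip_tail_snoc (xs : List Int) (x : Int) (h : xs ≠ []) :
    (xs ++ [x]).zip (xs ++ [x]).tail = xs.zip xs.tail ++ [(xs.getLast h, x)] := by
  induction xs with
  | nil => exact absurd rfl h
  | cons a t ih =>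
    cases t with
    | nil => simp
    | cons b t' =>
      have hbt : (b :: t') ≠ [] := by simp
      calc ((a :: b :: t') ++ [x]).zip (((a :: b :: t') ++ [x]).tail)
          = (a, b) :: (((b :: t') ++ [x]).zip (((b :: t') ++ [x]).tail)) := by simp
        _ = (a, b) :: ((b :: t').zip (b :: t').tail ++ [((b :: t').getLast hbt, x)]) := by
            rw [ih hbt]
        _ = (a :: b :: t').zip (a :: b :: t').tail ++ [((a :: b :: t').getLast h, x)] := by
            simp [List.getLast_cons]

-- bridge: A's index loop over range(1, len) reading arr[idx-1], arr[idx] is the fold over consecutive pairs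
lemma bridgeA {σ : Type} (f : σ → Int → Int → σ) (xs : List Int) (init : σ) :
    (PySem.List.pyRange 1 (xs.length : Int) 1).foldl
      (fun st idx => f st (PySem.List.pyGetD xs (idx - 1) 0) (PySem.List.pyGetD xs idx 0)) init
    = (xs.zip xs.tail).foldl (fun st p => f st p.1 p.2) init := by
  induction xs using List.reverseRecOn with
  | nil => simp [PySem.List.pyRange_one_eq_nil]
  | append_singleton xs x ih =>
    cases xs with
    | nil => simp [PySem.List.pyRange_one_eq_nil]
    | cons a t =>
      set ys : List Int := a :: t with hys
      have hne : ys ≠ [] := by simp [hys]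
      have hpos : 0 < ys.length := by simp [hys]
      have hn1 : (1 : Int) ≤ (ys.length : Int) := by exact_mod_cast hpos
      have hlen : ((ys ++ [x]).length : Int) = (ys.length : Int) + 1 := by
        push_cast [List.length_append, List.length_cons, List.length_nil]; omega
      rw [hlen, PySem.List.pyRange_one_succ_right hn1, List.foldl_append]
      rw [zip_tail_snoc ys x hne, List.foldl_append]
      have hget : ∀ (j : Int), 0 ≤ j → j < (ys.length : Int) →
          PySem.List.pyGetD (ys ++ [x]) j 0 = PySem.List.pyGetD ys j 0 := by
        intro j h0 h1
        have hj2 : j < ((ys ++ [x]).length : Int) := by rw [hlen]; omega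
        rw [PySem.List.pyGetD_eq_getElem _ _ h0 hj2,
            PySem.List.pyGetD_eq_getElem _ _ h0 h1,
            List.getElem_append_left (by omega)]
      have hcongr : ∀ (st : σ), ∀ idx ∈ PySem.List.pyRange 1 (ys.length : Int) 1,
          f st (PySem.List.pyGetD (ys ++ [x]) (idx - 1) 0) (PySem.List.pyGetD (ys ++ [x]) idx 0)
          = f st (PySem.List.pyGetD ys (idx - 1) 0) (PySem.List.pyGetD ys idx 0) := by
        intro st idx hmem
        rw [PySem.List.mem_pyRange_one] at hmem
        rw [hget idx (by omega) (by omega), hget (idx - 1) (by omega) (by omega)]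
      rw [PySem.List.foldl_congr_mem _ _ _ init hcongr, ih]
      have hL : PySem.List.pyGetD (ys ++ [x]) (ys.length : Int) 0 = x := by
        rw [PySem.List.pyGetD_eq_getElem _ _ (by omega) (by rw [hlen]; omega)]
        simp
      have hL1 : PySem.List.pyGetD (ys ++ [x]) ((ys.length : Int) - 1) 0 = ys.getLast hne := by
        rw [PySem.List.pyGetD_eq_getElem _ _ (by omega) (by rw [hlen]; omega),
            List.getLast_eq_getElem hne]
        rw [List.getElem_append_left (by omega)]
        congr 1
        omega
      simp only [List.foldl_cons, List.foldl_nil]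
      rw [hL, hL1]

-- A's pair fold with running minimum computes the fold of its difference stream
lemma aZipFold (ys : List Int) : ∀ (y m M : Int), -1 ≤ M →
    (((y :: ys).zip ys).foldl (fun st p => pvAStep st p.1 p.2) (m, M)).2
    = ((pvAD (min m y) ys).map pvPos).foldl max M := by
  induction ys with
  | nil => intro y m M _; simp [pvAD]
  | cons c t ih =>
    intro y m M hM
    have hstep : pvAStep (m, M) y c = (min m y, max M (pvPos (c - min m y))) := by
      unfold pvAStep
      have h1 : (if m > y then y else m) = min m y := by omega
      simp only [h1]
      have h2 : (c > min m y ∧ c - min m y > M) ↔ (0 < c - min m y ∧ c - min m y > M) := by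
        omega
      rw [if_congr h2 rfl rfl, clip_eq M _ hM]
    simp only [List.zip_cons_cons, List.foldl_cons]
    rw [hstep]
    rw [ih c (min m y) _ (le_trans hM (le_max_left _ _))]
    simp [pvAD, List.foldl_cons]

-- B's reverse scan accumulates cumulative maxima
lemma bScan (t : List Int) : ∀ (c : Int) (acc : List Int),
    t.foldl (fun (st : Option Int × List Int) x =>
      let cur := match st.1 with | none => x | some cc => max cc x
      (some cur, st.2 ++ [cur])) (some c, acc)
    = (some (t.foldl max c), acc ++ pvCM c t) := by
  induction t with
  | nil => intro c acc; simp [pvCM]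
  | cons y t ih =>
    intro c acc
    rw [List.foldl_cons]
    show t.foldl _ (some (max c y), acc ++ [max c y]) = _
    rw [ih]
    simp [pvCM, List.foldl_cons]

lemma bScan0 (l : List Int) :
    (l.foldl (fun (st : Option Int × List Int) x =>
      let cur := match st.1 with | none => x | some cc => max cc x
      (some cur, st.2 ++ [cur])) (none, [])).2 = pvCM0 l := by
  cases l with
  | nil => simp [pvCM0]
  | cons y t =>
    rw [List.foldl_cons]
    show (t.foldl _ (some y, [y])).2 = _
    rw [bScan]
    simp [pvCM0]

lemma pvCM_snoc (t : List Int) : ∀ (c x : Int),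
    pvCM c (t ++ [x]) = pvCM c t ++ [max (t.foldl max c) x] := by
  induction t with
  | nil => intro c x; rfl
  | cons y t ih =>
    intro c x
    simp only [List.cons_append, pvCM, List.foldl_cons]
    rw [ih]

lemma pvCM0_snoc (l : List Int) (x : Int) :
    pvCM0 (l ++ [x]) = pvCM0 l ++ [l.foldl max x] := by
  cases l with
  | nil => rfl
  | cons y t =>
    simp only [List.cons_append, pvCM0, List.foldl_cons]
    rw [pvCM_snoc]
    have h : max (t.foldl max y) x = t.foldl max (max x y) := by
      rw [foldl_max_pull, max_comm]
    rw [h]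

lemma pvCM0_rev (arr : List Int) : (pvCM0 arr.reverse).reverse = pvSfx arr := by
  induction arr with
  | nil => rfl
  | cons x xs ih =>
    simp only [List.reverse_cons]
    rw [pvCM0_snoc]
    rw [show (pvCM0 xs.reverse ++ [xs.reverse.foldl max x]).reverse
        = (xs.reverse.foldl max x) :: (pvCM0 xs.reverse).reverse from by simp]
    rw [foldl_max_reverse, ih]
    rfl

-- B's forward pass over (element, suffix-max) pairs folds to the all-pairs fold
lemma bZipFold (rest : List Int) : ∀ (x M : Int), -1 ≤ M →
    ((x :: rest).zip (pvSfx rest)).foldl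
      (fun best q =>
        let d := q.2 - q.1
        if d > 0 ∧ d > best then d else best) M
    = ((pvAllDiffs (x :: rest)).map pvPos).foldl max M := by
  induction rest with
  | nil => intro x M _; simp [pvSfx, pvAllDiffs]
  | cons c t ih =>
    intro x M hM
    have hclip : (if t.foldl max c - x > 0 ∧ t.foldl max c - x > M then t.foldl max c - x else M)
        = max M (pvPos (t.foldl max c - x)) := by
      have h2 : (t.foldl max c - x > 0 ∧ t.foldl max c - x > M)
          ↔ (0 < t.foldl max c - x ∧ t.foldl max c - x > M) := by omega
      rw [if_congr h2 rfl rfl, clip_eq M _ hM]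
    simp only [pvSfx, List.zip_cons_cons, List.foldl_cons]
    show ((c :: t).zip (pvSfx t)).foldl _
        (if t.foldl max c - x > 0 ∧ t.foldl max c - x > M then t.foldl max c - x else M)
      = _
    rw [hclip, ih c _ (le_trans hM (le_max_left _ _))]
    have hsplit : ((pvAllDiffs (x :: c :: t)).map pvPos).foldl max M
        = ((pvAllDiffs (c :: t)).map pvPos).foldl max
            (((c :: t).map (fun y => pvPos (y - x))).foldl max M) := by
      simp [pvAllDiffs, List.map_append, List.foldl_append, Function.comp_def]
    rw [hsplit, foldl_max_pos_shift t c x M]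

-- A equals the all-pairs fold on nonempty input
lemma solution_char (a0 : Int) (rest : List Int) :
    solution (a0 :: rest) = ((pvAllDiffs (a0 :: rest)).map pvPos).foldl max (-1) := by
  have h0 : solution (a0 :: rest)
      = ((PySem.List.pyRange 1 (((a0 :: rest).length : Int)) 1).foldl
          (fun st idx => pvAStep st (PySem.List.pyGetD (a0 :: rest) (idx - 1) 0)
            (PySem.List.pyGetD (a0 :: rest) idx 0)) (a0, -1)).2 := by
    unfold solution
    rw [PySem.List.pyGetD_zero_cons]
    rfl
  rw [h0, bridgeA pvAStep, List.tail_cons,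
      aZipFold rest a0 a0 (-1) (le_refl _), min_self, pvAD_eq_allDiffs]
  simp [pvAllDiffs, List.map_append, List.foldl_append, Function.comp_def]

-- B equals the all-pairs fold on nonempty input
lemma solution_alt_char (a0 : Int) (rest : List Int) :
    solution_alt (a0 :: rest) = ((pvAllDiffs (a0 :: rest)).map pvPos).foldl max (-1) := by
  unfold solution_alt
  simp only [bScan0, pvCM0_rev, PySem.List.slice_from_one]
  rw [show (pvSfx (a0 :: rest)).tail = pvSfx rest from by rfl]
  exact bZipFold rest a0 (-1) (le_refl _)

-- ===== VERDICT (by name: the statement is the Claim_ definition above) =====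
theorem solution_spec : Claim_equal_solution := by
  intro arr _ hpre
  unfold Spec_solution
  cases arr with
  | nil => exact absurd rfl hpre
  | cons a0 rest => rw [solution_char, solution_alt_char]
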